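-- pv_equiv track=rewrite | github.com/DonBurgandy22/gully | burgandy-cognitive-framework/src/loop_engine.py | get_cycle_nodes
-- ===== SOURCE A (Python) =====
-- from typing import Dict, List, Tuple
--
-- def get_cycle_nodes(cycles: List[List[str]]) -> List[str]:
--     """Return a deduplicated list of nodes that participate in any cycle."""
--     seen = set()
--     result = []
--     for cycle in cycles:
--         for node in cycle:
--             if node not in seen:
--                 seen.add(node)
--                 result.append(node)
--     return result
-- ===== SOURCE B (Python) =====
-- from typing import Dict, List, Tuple
--
-- def get_cycle_nodes(cycles: List[List[str]]) -> List[str]: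
--     """Return a deduplicated list of nodes that participate in any cycle."""
--     nodes = [node for cycle in cycles for node in cycle]
--     result = []
--     while nodes:
--         head = nodes[0]
--         result.append(head)
--         nodes = [n for n in nodes[1:] if n != head]
--     return result
-- ===== Notes on version B (the rewrite author's own statement) =====
-- stated objective: alternative
-- what changed: B flattens the cycles once and deduplicates by repeated pivot removal: take the first remaining node, then filter every copy of it out of the rest, with no seen-set and no membership branch.
import Mathlib
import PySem

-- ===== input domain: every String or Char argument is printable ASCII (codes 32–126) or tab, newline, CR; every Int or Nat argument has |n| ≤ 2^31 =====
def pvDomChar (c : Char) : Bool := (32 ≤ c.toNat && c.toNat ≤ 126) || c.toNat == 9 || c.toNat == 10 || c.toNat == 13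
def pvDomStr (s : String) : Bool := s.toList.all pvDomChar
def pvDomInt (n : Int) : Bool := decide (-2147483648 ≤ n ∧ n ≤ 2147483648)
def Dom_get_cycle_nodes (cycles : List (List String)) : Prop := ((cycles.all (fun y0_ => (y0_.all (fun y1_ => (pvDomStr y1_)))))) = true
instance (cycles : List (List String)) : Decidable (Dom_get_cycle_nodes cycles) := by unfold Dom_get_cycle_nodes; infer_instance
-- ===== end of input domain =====

-- B flattens once and deduplicates by repeated pivot removal (filter out copies of the first node), instead of A's seen-set with a membership branch. Return values proved equal.

-- ===== PORT A =====
-- explicit seen-set + result-list accumulator, membership guard, as in A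
def get_cycle_nodes (cycles : List (List String)) : List String :=
  (cycles.foldl
    (fun (st : PySem.Set String × List String) cycle =>
      cycle.foldl
        (fun st node =>
          if PySem.Set.contains st.1 node then st
          else (PySem.Set.add st.1 node, st.2 ++ [node]))
        st)
    (PySem.Set.empty, [])).2

-- ===== PORT B =====
-- the while loop: take nodes[0], append it, drop its copies from nodes[1:]
def pvPivotDedup : List String → List String
  | [] => []
  | head :: rest => head :: pvPivotDedup (rest.filter (fun n => n != head))
termination_by xs => xs.length
decreasing_by
  simpa using Nat.lt_succ_of_le (List.length_filter_le _ _)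

-- flatten the cycles, then run the pivot-removal loop
def get_cycle_nodes_alt (cycles : List (List String)) : List String :=
  pvPivotDedup (cycles.flatMap (fun cycle => cycle))

-- ===== PRECONDITION & SPEC =====
def Spec_get_cycle_nodes (cycles : List (List String)) (out : List String) : Prop := out = get_cycle_nodes_alt cycles
instance (cycles : List (List String)) (out : List String) : Decidable (Spec_get_cycle_nodes cycles out) := by unfold Spec_get_cycle_nodes; infer_instance

-- ===== CLAIM (what is proved, stated in full; the proofs are below) =====
def Claim_equal_get_cycle_nodes : Prop := ∀ (cycles : List (List String)), Dom_get_cycle_nodes cycles → Spec_get_cycle_nodes cycles (get_cycle_nodes cycles)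

-- ===== LEMMAS AND PROOFS =====

-- A's inner loop on a duplicated state is Set.add folded over the cycle, duplicated
theorem inner_step_eq (cycle : List String) (s : PySem.Set String) :
    cycle.foldl
      (fun (st : PySem.Set String × List String) node =>
        if PySem.Set.contains st.1 node then st
        else (PySem.Set.add st.1 node, st.2 ++ [node])) (s, s)
    = (cycle.foldl PySem.Set.add s, cycle.foldl PySem.Set.add s) := by
  induction cycle generalizing s with
  | nil => rfl
  | cons x xs ih =>
    simp only [List.foldl_cons]
    by_cases h : x ∈ s
    · simpa [h, PySem.Set.add, PySem.Set.contains] using ih s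
    · simpa [h, PySem.Set.add, PySem.Set.contains] using ih (s ++ [x])

-- A's outer loop on a duplicated state is the foldl of Set.add over the flattened nodes, duplicated
theorem outer_eq (cycles : List (List String)) (s : PySem.Set String) :
    cycles.foldl
      (fun (st : PySem.Set String × List String) cycle =>
        cycle.foldl
          (fun st node =>
            if PySem.Set.contains st.1 node then st
            else (PySem.Set.add st.1 node, st.2 ++ [node])) st) (s, s)
    = ((cycles.flatMap (fun c => c)).foldl PySem.Set.add s,
       (cycles.flatMap (fun c => c)).foldl PySem.Set.add s) := by
  induction cycles generalizing s with
  | nil => rfl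
  | cons c cs ih =>
    simp only [List.foldl_cons, List.flatMap_cons, List.foldl_append, inner_step_eq]
    exact ih _

-- the seen-set fold equals the pivot-removal loop run on the not-yet-seen elements
theorem foldl_add_eq_pivot (xs : List String) (s : PySem.Set String) :
    xs.foldl PySem.Set.add s = s ++ pvPivotDedup (xs.filter (fun n => !s.contains n)) := by
  induction xs generalizing s with
  | nil => simp [pvPivotDedup]
  | cons x xs ih =>
    simp only [List.foldl_cons, List.filter_cons]
    by_cases h : x ∈ s
    · simpa [PySem.Set.add, h, List.contains_iff_mem] using ih s
    · have hx : (s.contains x) = false := by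
        simpa [List.contains_iff_mem] using h
      rw [PySem.Set.add, if_neg (by simpa [PySem.Set.contains, List.contains_iff_mem] using h)]
      rw [ih (s ++ [x])]
      simp only [hx, Bool.not_false, if_pos, pvPivotDedup, List.append_assoc,
        List.singleton_append]
      congr 2
      rw [List.filter_filter]
      apply congrArg
      apply List.filter_congr
      intro a _
      cases hax : a == x <;> cases has : s.contains a <;> simp_all

-- ===== VERDICT (by name: the statement is the Claim_ definition above) =====
theorem get_cycle_nodes_spec : Claim_equal_get_cycle_nodes := by
  intro cycles _
  unfold Spec_get_cycle_nodes get_cycle_nodes get_cycle_nodes_alt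
  rw [show (PySem.Set.empty : PySem.Set String) = [] from rfl]
  rw [outer_eq, foldl_add_eq_pivot]
  rw [show (cycles.flatMap fun c => c).filter
        (fun n => !(PySem.Set.contains ([] : PySem.Set String) n))
      = cycles.flatMap fun c => c from List.filter_eq_self.mpr (fun _ _ => rfl)]
  simp
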